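-- pv_equiv track=rewrite | github.com/bradenripple5/factorio_automation | recipe_extraction.py | _strip_lua_comments
-- ===== SOURCE A (Python) =====
-- def _strip_lua_comments(s):
-- 	out = []
-- 	i = 0
-- 	in_string = None
-- 	in_long_comment = False
-- 	while i < len(s):
-- 		ch = s[i]
-- 		nxt = s[i+1] if i + 1 < len(s) else ""
--
-- 		if in_long_comment:
-- 			if ch == "]" and nxt == "]":
-- 				in_long_comment = False
-- 				i += 2
-- 				continue
-- 			i += 1
-- 			continue
--
-- 		if in_string:
-- 			out.append(ch)
-- 			if ch == "\\":
-- 				if i + 1 < len(s):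
-- 					out.append(s[i+1])
-- 					i += 2
-- 					continue
-- 			elif ch == in_string:
-- 				in_string = None
-- 			i += 1
-- 			continue
--
-- 		if ch in ["'", '"']:
-- 			in_string = ch
-- 			out.append(ch)
-- 			i += 1
-- 			continue
--
-- 		if ch == "-" and nxt == "-":
-- 			third = s[i+2] if i + 2 < len(s) else ""
-- 			fourth = s[i+3] if i + 3 < len(s) else ""
-- 			if third == "[" and fourth == "[":
-- 				in_long_comment = True
-- 				i += 4
-- 				continue
-- 			while i < len(s) and s[i] != "\n":
-- 				i += 1
-- 			continue
--
-- 		out.append(ch)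
-- 		i += 1
-- 	return "".join(out)
-- ===== SOURCE B (Python) =====
-- import re
--
-- # One alternation tried left-to-right by the regex engine: a quoted string
-- # (kept), a long comment --[[ ... ]] (dropped, may run to end of input), or a
-- # line comment -- ... (dropped, trailing newline kept).
-- _LUA_TOKEN = re.compile(
--     r"""'(?:\\.|[^'\\])*'?|"(?:\\.|[^"\\])*"?|--\[\[.*?(?:\]\]|\Z)|--[^\n]*""",
--     re.S,
-- )
--
-- def _strip_lua_comments(s):
--     return _LUA_TOKEN.sub(lambda m: m.group(0) if m.group(0)[0] in "'\"" else "", s)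
-- ===== Notes on version B (the rewrite author's own statement) =====
-- stated objective: idiomatic
-- what changed: The hand-written index/state while-loop is replaced by a single re.sub over one alternation pattern (quoted string kept; --[[ ]] long comment and -- line comment dropped), letting the regex engine do the scanning.
import Mathlib
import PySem

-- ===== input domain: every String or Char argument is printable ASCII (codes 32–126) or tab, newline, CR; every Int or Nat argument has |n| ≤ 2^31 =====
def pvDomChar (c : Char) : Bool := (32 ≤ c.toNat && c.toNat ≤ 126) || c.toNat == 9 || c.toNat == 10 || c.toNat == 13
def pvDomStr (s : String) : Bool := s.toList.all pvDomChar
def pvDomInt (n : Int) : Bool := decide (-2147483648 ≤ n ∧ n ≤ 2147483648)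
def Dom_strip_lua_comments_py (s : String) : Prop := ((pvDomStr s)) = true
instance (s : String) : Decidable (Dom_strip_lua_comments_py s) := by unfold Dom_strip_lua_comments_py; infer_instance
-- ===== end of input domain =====

-- B replaces A's per-character index/state while-loop with a single re.sub over
-- an alternation of the three lexemes (idiomatic; measured faster in a timing run).

-- ===== PORT A =====
-- the inner `while i < len(s) and s[i] != "\n": i += 1` of the line-comment branch
def skipLineA (cs : List Char) (i : Nat) : Nat :=
  if h : i < cs.length then
    if cs[i] = '\n' then i else skipLineA cs (i + 1)
  else i
termination_by cs.length - i

theorem skipLineA_ge (cs : List Char) (i : Nat) : i ≤ skipLineA cs i := by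
  unfold skipLineA
  split
  · split
    · exact le_refl i
    · exact Nat.le_trans (Nat.le_succ i) (skipLineA_ge cs (i + 1))
  · exact le_refl i
termination_by cs.length - i

theorem skipLineA_lt (cs : List Char) (i : Nat) (h : i < cs.length)
    (hc : cs[i] ≠ '\n') : cs.length - skipLineA cs i < cs.length - i := by
  rw [skipLineA, dif_pos h, if_neg hc]
  have := skipLineA_ge cs (i + 1)
  omega

-- the main `while i < len(s)` loop of A, on s as a char list with index i;
-- the Python sentinel "" for an out-of-range lookahead is modeled as `none`
def loopA (cs : List Char) (i : Nat) (inStr : Option Char) (inLong : Bool)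
    (out : List Char) : List Char :=
  if h : i < cs.length then
    let ch := cs[i]
    let nxt : Option Char := cs[i + 1]?
    if inLong then
      if ch = ']' ∧ nxt = some ']' then loopA cs (i + 2) inStr false out
      else loopA cs (i + 1) inStr true out
    else
      match inStr with
      | some q =>
        let out' := out ++ [ch]
        if ch = '\\' then
          if h2 : i + 1 < cs.length then
            loopA cs (i + 2) (some q) inLong (out' ++ [cs[i + 1]])
          else loopA cs (i + 1) (some q) inLong out'
        else if ch = q then loopA cs (i + 1) none inLong out'
        else loopA cs (i + 1) (some q) inLong out'
      | none =>
        if ch = '\'' ∨ ch = '"' then loopA cs (i + 1) (some ch) inLong (out ++ [ch])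
        else if hcc : ch = '-' ∧ nxt = some '-' then
          let third : Option Char := cs[i + 2]?
          let fourth : Option Char := cs[i + 3]?
          if third = some '[' ∧ fourth = some '[' then loopA cs (i + 4) inStr true out
          else loopA cs (skipLineA cs i) inStr inLong out
        else loopA cs (i + 1) inStr inLong (out ++ [ch])
  else out
termination_by cs.length - i
decreasing_by
  all_goals first
    | omega
    | exact skipLineA_lt cs i h (by have h1 : cs[i] = '-' := hcc.1; intro hn; rw [hn] at h1; exact absurd h1 (by decide))

def strip_lua_comments_py (s : String) : String :=
  String.ofList (loopA s.toList 0 none false [])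

-- ===== PORT B =====
-- B is a single re.sub over an alternation; PySem has no regex engine, so the
-- engine's left-to-right leftmost-match scan of exactly this alternation is
-- ported by hand (exact on all inputs): scanB walks the text, and at each
-- position tries the alternatives in order (quoted string — kept; --[[ long
-- comment to ]] or end — dropped; -- line comment to before \n — dropped),
-- otherwise copies the character.

-- the consumed body+closing quote of `(?:\\.|[^q\\])*q?` and the remainder
def strBody (q : Char) : List Char → List Char × List Char
  | [] => ([], [])
  | c :: rest =>
    if c = '\\' then
      match rest with
      | [] => ([], [c])                 -- lone trailing backslash stays unmatched
      | c2 :: rest2 => (c :: c2 :: (strBody q rest2).1, (strBody q rest2).2)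
    else if c = q then ([q], rest)
    else (c :: (strBody q rest).1, (strBody q rest).2)

-- remainder after the lazy `.*?(?:\]\]|\Z)` of a long comment
def longBody : List Char → List Char
  | [] => []
  | c :: rest => if c = ']' ∧ rest.head? = some ']' then rest.tail else longBody rest

-- remainder from the first newline on (line comments keep their newline)
def lineRest : List Char → List Char
  | [] => []
  | c :: rest => if c = '\n' then c :: rest else lineRest rest

theorem strBody_le (q : Char) (l : List Char) : (strBody q l).2.length ≤ l.length := by
  fun_induction strBody q l <;> simp_all <;> omega

theorem longBody_le (l : List Char) : (longBody l).length ≤ l.length := by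
  fun_induction longBody l <;> simp_all [List.length_tail] <;> omega

theorem lineRest_le (l : List Char) : (lineRest l).length ≤ l.length := by
  fun_induction lineRest l <;> simp_all
  omega

-- the re.sub scan: leftmost match, alternatives in the pattern's order
def scanB : List Char → List Char
  | [] => []
  | c :: rest =>
    if c = '\'' ∨ c = '"' then
      c :: ((strBody c rest).1 ++ scanB (strBody c rest).2)
    else if c = '-' ∧ rest.head? = some '-' then
      if rest.tail.head? = some '[' ∧ rest.tail.tail.head? = some '[' then
        scanB (longBody rest.tail.tail.tail)
      else scanB (lineRest rest.tail)
    else c :: scanB rest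
termination_by l => l.length
decreasing_by
  · have := strBody_le c rest; simp; omega
  · have := longBody_le rest.tail.tail.tail
    have : rest.tail.tail.tail.length ≤ rest.length := by
      simp [List.length_tail]; omega
    simp; omega
  · have := lineRest_le rest.tail
    have : rest.tail.length ≤ rest.length := by simp [List.length_tail]
    simp; omega
  · simp

def strip_lua_comments_py_alt (s : String) : String := String.ofList (scanB s.toList)

-- ===== PRECONDITION & SPEC =====
def Spec_strip_lua_comments_py (s : String) (out : String) : Prop := out = strip_lua_comments_py_alt s
instance (s : String) (out : String) : Decidable (Spec_strip_lua_comments_py s out) := by unfold Spec_strip_lua_comments_py; infer_instance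

-- ===== CLAIM (what is proved, stated in full; the proofs are below) =====
def Claim_equal_strip_lua_comments_py : Prop := ∀ (s : String), Dom_strip_lua_comments_py s → Spec_strip_lua_comments_py s (strip_lua_comments_py s)

-- ===== LEMMAS AND PROOFS =====

-- A's index loop equals B's token scanner on the remaining suffix, for each
-- of the three states A can be in (code / long comment / inside a q-string).
-- A's line-comment skip lands exactly at B's lineRest remainder
theorem skipLineA_drop (cs : List Char) (i : Nat) :
    cs.drop (skipLineA cs i) = lineRest (cs.drop i) := by
  fun_induction skipLineA cs i with
  | case1 i h hnl =>
    rw [List.drop_eq_getElem_cons h, lineRest, if_pos hnl, ← List.drop_eq_getElem_cons h]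
  | case2 i h hnl ih =>
    rw [ih, List.drop_eq_getElem_cons h, lineRest, if_neg hnl]
  | case3 i h =>
    rw [List.drop_eq_nil_iff.mpr (by omega)]
    rfl

theorem strBody_eq_close (q : Char) (L : List Char) (h : q ≠ '\\') :
    strBody q (q :: L) = ([q], L) := by
  rw [strBody.eq_def]; simp [h]

theorem strBody_other (q c : Char) (L : List Char) (h1 : c ≠ '\\') (h2 : c ≠ q) :
    strBody q (c :: L) = (c :: (strBody q L).1, (strBody q L).2) := by
  rw [strBody.eq_def]; simp [h1, h2]

theorem head?_tail1 (l : List Char) : l.tail.head? = l[1]? := by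
  cases l <;> simp [List.head?_eq_getElem?]

theorem head?_tail2 (l : List Char) : l.tail.tail.head? = l[2]? := by
  cases l with
  | nil => simp
  | cons a t => simp [head?_tail1 t]

theorem loopA_eq (cs : List Char) : ∀ (n i : Nat) (out : List Char), cs.length - i = n →
    (loopA cs i none false out = out ++ scanB (cs.drop i)) ∧
    (loopA cs i none true out = out ++ scanB (longBody (cs.drop i))) ∧
    (∀ q, q ≠ '\\' →
      loopA cs i (some q) false out
        = out ++ (strBody q (cs.drop i)).1 ++ scanB (strBody q (cs.drop i)).2) := by
  intro n
  induction n using Nat.strong_induction_on with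
  | _ n ih =>
    intro i out hn
    cases hdrop : cs.drop i with
    | nil =>
      have hle : ¬ i < cs.length := by
        have := List.drop_eq_nil_iff.mp hdrop; omega
      refine ⟨?_, ?_, fun q hq => ?_⟩ <;>
        · rw [loopA, dif_neg hle]; simp [scanB, longBody, strBody]
    | cons c L =>
      have hi : i < cs.length := by
        by_contra hle
        rw [List.drop_eq_nil_iff.mpr (by omega)] at hdrop
        exact absurd hdrop (by simp)
      have hc : cs[i] = c := by
        have h0 := @List.head?_drop _ cs i
        rw [hdrop, List.getElem?_eq_getElem hi] at h0
        exact (Option.some_injective _ h0.symm)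
      have h1 : cs.drop (i+1) = L := by
        rw [← List.tail_drop, hdrop]; rfl
      have h2 : cs.drop (i+2) = L.tail := by
        rw [show i+2 = i+1+1 from rfl, ← List.tail_drop, h1]
      have h3 : cs.drop (i+3) = L.tail.tail := by
        rw [show i+3 = i+2+1 from rfl, ← List.tail_drop, h2]
      have h4 : cs.drop (i+4) = L.tail.tail.tail := by
        rw [show i+4 = i+3+1 from rfl, ← List.tail_drop, h3]
      have hnxt : cs[i+1]? = L.head? := by rw [← @List.head?_drop _ cs (i+1), h1]
      have h3rd : cs[i+2]? = L.tail.head? := by rw [← @List.head?_drop _ cs (i+2), h2]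
      have h4th : cs[i+3]? = L.tail.tail.head? := by rw [← @List.head?_drop _ cs (i+3), h3]
      refine ⟨?_, ?_, fun q hq => ?_⟩
      · -- code mode
        rw [loopA, dif_pos hi]
        simp only [hc, hnxt, h3rd, h4th, Bool.false_eq_true, if_false]
        by_cases hqc : c = '\'' ∨ c = '"'
        · have hq' : c ≠ '\\' := by rcases hqc with h | h <;> simp [h]
          have hih := (ih (cs.length - (i+1)) (by omega) (i+1) (out ++ [c]) rfl).2.2 c hq'
          rw [h1] at hih
          simp [hqc, hih, scanB]
        · rw [if_neg hqc]
          by_cases hdd : c = '-' ∧ L.head? = some '-'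
          · rw [dif_pos hdd]
            by_cases hbb : L.tail.head? = some '[' ∧ L.tail.tail.head? = some '['
            · -- long comment opens
              have hih := (ih (cs.length - (i+4)) (by omega) (i+4) out rfl).2.1
              rw [h4] at hih
              simp [hbb, hih, scanB, hdd]
            · -- line comment
              have hs1 : skipLineA cs i = skipLineA cs (i+2) := by
                rw [skipLineA, dif_pos hi, if_neg (by simp [hc, hdd.1])]
                have hi1 : i + 1 < cs.length := by
                  by_contra hle
                  rw [List.drop_eq_nil_iff.mpr (by omega)] at h1
                  rw [← h1] at hdd
                  simp at hdd
                have hc1 : cs[i+1] = '-' := by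
                  have h0 := hnxt
                  rw [List.getElem?_eq_getElem hi1, hdd.2] at h0
                  exact Option.some_injective _ h0
                rw [skipLineA, dif_pos hi1, if_neg (by simp [hc1])]
              have hlt : cs.length - skipLineA cs i < n := by
                have := skipLineA_lt cs i hi (by simp [hc, hdd.1])
                omega
              have hih := (ih (cs.length - skipLineA cs i) hlt (skipLineA cs i) out rfl).1
              have hdropskip : cs.drop (skipLineA cs i) = lineRest L.tail := by
                rw [hs1, skipLineA_drop, h2]
              rw [hdropskip] at hih
              rw [if_neg hbb, hih]
              have hbb' : ¬(L[1]? = some '[' ∧ L[2]? = some '[') := by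
                rw [← head?_tail1, ← head?_tail2]; exact hbb
              simp [scanB, hdd]
              intro ha hb
              exact absurd ⟨ha, hb⟩ hbb'
          · rw [dif_neg hdd]
            have hih := (ih (cs.length - (i+1)) (by omega) (i+1) (out ++ [c]) rfl).1
            rw [h1] at hih
            rw [hih]
            simp [scanB, hqc, hdd]
      · -- long-comment mode
        rw [loopA, dif_pos hi]
        simp only [hc, hnxt, if_true]
        by_cases hbr : c = ']' ∧ L.head? = some ']'
        · have hih := (ih (cs.length - (i+2)) (by omega) (i+2) out rfl).1
          rw [h2] at hih
          simp [hbr, hih, longBody]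
        · have hih := (ih (cs.length - (i+1)) (by omega) (i+1) out rfl).2.1
          rw [h1] at hih
          simp [hbr, hih, longBody]
      · -- string mode, delimiter q
        rw [loopA, dif_pos hi]
        simp only [hc, hnxt, Bool.false_eq_true, if_false]
        by_cases hbs : c = '\\'
        · cases hL : L with
          | nil =>
            have hn1 : ¬ i + 1 < cs.length := by
              rw [hL] at h1
              have := List.drop_eq_nil_iff.mp h1
              omega
            have hih := (ih (cs.length - (i+1)) (by omega) (i+1) (out ++ [c]) rfl).2.2 q hq
            rw [h1, hL] at hih
            simp [hbs, hn1, strBody, scanB]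
            simp [hbs, strBody, scanB] at hih
            exact hih
          | cons c2 L2 =>
            have hi1 : i + 1 < cs.length := by
              by_contra hle
              rw [List.drop_eq_nil_iff.mpr (by omega), hL] at h1
              exact absurd h1 (by simp)
            have hc2 : cs[i+1] = c2 := by
              have h0 := hnxt
              rw [List.getElem?_eq_getElem hi1, hL] at h0
              exact Option.some_injective _ h0
            have hih := (ih (cs.length - (i+2)) (by omega) (i+2)
                (out ++ [c] ++ [cs[i+1]]) rfl).2.2 q hq
            rw [h2, hL] at hih
            simp only [List.tail_cons] at hih
            simp [hbs, hi1, strBody]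
            simpa [hbs, hc2] using hih
        · rw [if_neg hbs]
          by_cases hcq : c = q
          · have hih := (ih (cs.length - (i+1)) (by omega) (i+1) (out ++ [c]) rfl).1
            rw [h1] at hih
            subst hcq
            simp [hih, strBody_eq_close _ L hq]
          · have hih := (ih (cs.length - (i+1)) (by omega) (i+1) (out ++ [c]) rfl).2.2 q hq
            rw [h1] at hih
            simp [hih, hcq]
            simp [strBody_other _ _ _ hbs hcq]

-- ===== VERDICT (by name: the statement is the Claim_ definition above) =====
theorem strip_lua_comments_py_spec : Claim_equal_strip_lua_comments_py := by
  intro s _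
  unfold Spec_strip_lua_comments_py strip_lua_comments_py strip_lua_comments_py_alt
  have := (loopA_eq s.toList (s.toList.length - 0) 0 [] rfl).1
  simp at this
  rw [this]
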